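-- pv_equiv track=rewrite | github.com/RegusAl/UBB | Semestrul 1/Fundamentele Programarii/Laborator/Lab 3/aplicatie.py | max_interval
-- ===== SOURCE A (Python) =====
-- def max_interval(list):
--     aux_list = []
--     max_list = aux_list.copy()
--     max = 0
--     nr = 0
--     for i in list:
--         if i <= 10 and i >= 0:
--             nr += 1
--             aux_list.append(i)
--         elif nr>max:
--             max = nr
--             nr = 0
--             max_list = aux_list.copy()
--             aux_list = []
--         else:
--             nr = 0
--             aux_list = []
--     if nr>max:
--         max = nr
--         nr = 0
--         max_list = aux_list.copy()
--         aux_list = []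
--     return max_list
-- ===== SOURCE B (Python) =====
-- def max_interval(list):
--     # Phase 1: split out the maximal runs of in-range values [0,10].
--     runs = []
--     i, n = 0, len(list)
--     while i < n:
--         if 0 <= list[i] <= 10:
--             j = i + 1
--             while j < n and 0 <= list[j] <= 10:
--                 j += 1
--             runs.append(list[i:j])
--             i = j
--         else:
--             i += 1
--     # Phase 2: pick the earliest longest run (strict > keeps the first).
--     best = []
--     for run in runs:
--         if len(run) > len(best):
--             best = run
--     return best
-- ===== Notes on version B (the rewrite author's own statement) =====
-- stated objective: alternative
-- what changed: Replaces A's fused counter/accumulator/best-copy state machine (with its duplicated post-loop flush) by a two-phase group-then-select decomposition: first partition the input into the maximal in-range runs, then scan those runs keeping the earliest strictly-longest one.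
import Mathlib
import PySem

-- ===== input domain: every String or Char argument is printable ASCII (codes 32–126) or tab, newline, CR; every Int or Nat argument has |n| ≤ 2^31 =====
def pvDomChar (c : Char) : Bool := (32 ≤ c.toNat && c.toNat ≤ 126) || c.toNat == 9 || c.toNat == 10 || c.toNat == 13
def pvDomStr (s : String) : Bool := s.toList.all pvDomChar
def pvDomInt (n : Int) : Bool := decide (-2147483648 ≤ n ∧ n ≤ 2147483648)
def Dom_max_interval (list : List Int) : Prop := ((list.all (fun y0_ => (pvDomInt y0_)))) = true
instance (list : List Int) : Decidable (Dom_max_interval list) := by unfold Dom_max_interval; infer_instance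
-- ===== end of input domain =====

-- B replaces A's one-pass counter/accumulator state machine by a two-phase
-- group-then-select decomposition (same cost, plainer structure).

-- ===== PORT A =====
-- loop body of A: state (aux_list, max_list, max, nr)
def pvStepA (s : List Int × List Int × Int × Int) (i : Int) : List Int × List Int × Int × Int :=
  match s with
  | (aux, maxl, mx, nr) =>
    if i ≤ 10 ∧ 0 ≤ i then (aux ++ [i], maxl, mx, nr + 1)
    else if nr > mx then ([], aux, nr, 0)
    else ([], maxl, mx, 0)

-- the post-loop flush of A
def pvFinalA (s : List Int × List Int × Int × Int) : List Int :=
  match s with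
  | (aux, maxl, mx, nr) => if nr > mx then aux else maxl

def max_interval (list : List Int) : List Int :=
  pvFinalA (list.foldl pvStepA ([], [], 0, 0))

-- ===== PORT B =====
def pvInR (x : Int) : Bool := decide (0 ≤ x ∧ x ≤ 10)

-- Phase 1 of B: the maximal in-range runs.  B's Python scans ahead with an index
-- and slices out list[i:j]; on the current suffix that is exactly
-- takeWhile/dropWhile of the in-range predicate.
def pvRuns (xs : List Int) : List (List Int) :=
  match xs with
  | [] => []
  | x :: rest =>
    if pvInR x then (x :: rest.takeWhile pvInR) :: pvRuns (rest.dropWhile pvInR)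
    else pvRuns rest
termination_by xs.length
decreasing_by
  · exact Nat.lt_succ_of_le (List.length_dropWhile_le _ _)
  · simp

-- Phase 2 of B: keep the earliest strictly-longest run.
def max_interval_alt (list : List Int) : List Int :=
  (pvRuns list).foldl (fun best run => if run.length > best.length then run else best) []

-- ===== PRECONDITION & SPEC =====
def Spec_max_interval (list : List Int) (out : List Int) : Prop := out = max_interval_alt list
instance (list : List Int) (out : List Int) : Decidable (Spec_max_interval list out) := by unfold Spec_max_interval; infer_instance

-- ===== CLAIM (what is proved, stated in full; the proofs are below) =====
def Claim_equal_max_interval : Prop := ∀ (list : List Int), Dom_max_interval list → Spec_max_interval list (max_interval list)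

-- ===== LEMMAS AND PROOFS =====

-- B's selection step, named for the proofs (definitionally the lambda in max_interval_alt)
def pvChoose (best run : List Int) : List Int := if run.length > best.length then run else best

-- intermediate recursive form bridging A's fold and B's runs
def pvBestFrom (maxl aux : List Int) (xs : List Int) : List Int :=
  match xs with
  | [] => pvChoose maxl aux
  | x :: rest =>
    if pvInR x then pvBestFrom maxl (aux ++ [x]) rest
    else pvBestFrom (pvChoose maxl aux) [] rest

theorem pvL (xs : List Int) : ∀ (aux maxl : List Int),
    pvFinalA (xs.foldl pvStepA (aux, maxl, (maxl.length : Int), (aux.length : Int)))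
      = pvBestFrom maxl aux xs := by
  induction xs with
  | nil =>
    intro aux maxl
    simp [pvFinalA, pvBestFrom, pvChoose, gt_iff_lt, Nat.cast_lt]
  | cons x rest ih =>
    intro aux maxl
    by_cases h : 0 ≤ x ∧ x ≤ 10
    · have h1 : ((aux.length : Int) + 1) = (((aux ++ [x]).length : Int)) := by
        simp
      simp only [List.foldl, pvStepA, pvBestFrom, pvInR, h, h1]
      exact ih (aux ++ [x]) maxl
    · have hA : ¬ (x ≤ 10 ∧ 0 ≤ x) := fun ⟨h2, h1⟩ => h ⟨h1, h2⟩
      simp only [List.foldl, pvStepA, if_neg hA, pvBestFrom, pvInR, h, decide_false,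
        Bool.false_eq_true, if_false]
      by_cases hlt : maxl.length < aux.length
      · have hlt' : ((aux.length : Int)) > ((maxl.length : Int)) := by exact_mod_cast hlt
        rw [if_pos hlt']
        have := ih [] aux
        simpa [pvChoose, if_pos hlt] using this
      · have hlt' : ¬ ((aux.length : Int)) > ((maxl.length : Int)) := by
          simpa using Int.ofNat_le.mpr (Nat.le_of_not_lt hlt)
        rw [if_neg hlt']
        have := ih [] maxl
        simpa [pvChoose, if_neg hlt] using this

theorem pvChoose_nil (b : List Int) : pvChoose b [] = b := by simp [pvChoose]

theorem pvN (xs : List Int) (b : List Int) :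
    List.foldl pvChoose b ((xs.takeWhile pvInR) :: pvRuns (xs.dropWhile pvInR))
      = List.foldl pvChoose b (pvRuns xs) := by
  cases xs with
  | nil => simp [pvRuns, pvChoose_nil]
  | cons x rest =>
    by_cases h : pvInR x
    · simp [pvRuns, List.takeWhile, List.dropWhile, h]
    · simp [pvRuns, List.takeWhile, List.dropWhile, h, pvChoose_nil]

theorem pvM (xs : List Int) : ∀ (aux maxl : List Int),
    pvBestFrom maxl aux xs
      = List.foldl pvChoose maxl ((aux ++ xs.takeWhile pvInR) :: pvRuns (xs.dropWhile pvInR)) := by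
  induction xs with
  | nil => intro aux maxl; simp [pvBestFrom, pvRuns]
  | cons x rest ih =>
    intro aux maxl
    by_cases h : pvInR x
    · simp only [pvBestFrom, h, if_pos, List.takeWhile, List.dropWhile]
      rw [ih (aux ++ [x]) maxl]
      simp
    · simp only [pvBestFrom, h, Bool.false_eq_true, if_false, List.takeWhile, List.dropWhile]
      rw [ih [] (pvChoose maxl aux)]
      rw [List.nil_append, pvN rest (pvChoose maxl aux)]
      simp [pvRuns, h]

-- ===== VERDICT (by name: the statement is the Claim_ definition above) =====
theorem max_interval_spec : Claim_equal_max_interval := by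
  intro list _
  show max_interval list = max_interval_alt list
  have h1 : max_interval list = pvBestFrom [] [] list := by
    have := pvL list [] []
    simpa [max_interval] using this
  have h2 : max_interval_alt list = List.foldl pvChoose [] (pvRuns list) := rfl
  rw [h1, h2, pvM list [] [], List.nil_append, ← pvN list []]
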